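-- pv_equiv track=rewrite | github.com/simsendx/plexus | src/plexus/utils/utils.py | find_max_poly_X
-- ===== SOURCE A (Python) =====
-- def find_max_poly_X(kmer, n):
--     """
--     Check if a DNA sequence has more than n consecutive identical bases.
--
--     Args:
--         dna_sequence (str): The DNA sequence to check
--         n (int): The threshold for consecutive bases (default is 4)
--
--     Returns:
--         bool: True if there are more than n consecutive identical bases, False otherwise
--     """
--     if len(kmer) <= n:
--         return False
--
--     current_base = kmer[0]
--     count = 1
--
--     for i in range(1, len(kmer)):
--         if kmer[i] == current_base:
--             count += 1
--             if count > n: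
--                 return True
--         else:
--             current_base = kmer[i]
--             count = 1
--
--     return False
-- ===== SOURCE B (Python) =====
-- def _runs(s):
--     # maximal runs of identical characters, left to right
--     out = []
--     while s:
--         i = 1
--         while i < len(s) and s[i] == s[0]:
--             i += 1
--         out.append(i)
--         s = s[i:]
--     return out
--
--
-- def find_max_poly_X(kmer, n):
--     if len(kmer) <= n:
--         return False
--     return any(r > n for r in _runs(kmer))
-- ===== Notes on version B (the rewrite author's own statement) =====
-- stated objective: alternative
-- what changed: B first decomposes the string into its maximal runs of identical characters and then tests whether any run exceeds n, instead of A's incremental counter with a reset-on-change branch and early return.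
-- intended difference: For n <= 0 and a nonempty kmer with no two adjacent equal characters, A returns False (its > n check only fires after a second consecutive match) while B returns True, which is intended since every single base is already a run of length 1 > n. — e.g. on find_max_poly_X("AT", 0): A returns false, B returns true
import Mathlib
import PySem

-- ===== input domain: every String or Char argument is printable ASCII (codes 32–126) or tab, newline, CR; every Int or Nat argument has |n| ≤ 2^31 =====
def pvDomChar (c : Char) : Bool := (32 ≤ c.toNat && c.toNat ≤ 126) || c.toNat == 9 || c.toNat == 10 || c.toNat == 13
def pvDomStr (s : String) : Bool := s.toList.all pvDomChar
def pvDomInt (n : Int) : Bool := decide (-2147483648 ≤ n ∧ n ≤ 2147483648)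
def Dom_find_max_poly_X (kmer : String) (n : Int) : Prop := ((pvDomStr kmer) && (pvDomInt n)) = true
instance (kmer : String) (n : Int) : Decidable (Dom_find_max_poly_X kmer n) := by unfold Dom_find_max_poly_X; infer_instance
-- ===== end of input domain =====

-- B decomposes the string into its maximal runs of identical characters and then tests whether
-- any run exceeds n, instead of A's incremental counter with a reset-on-change branch (alternative).

-- ===== PORT A =====
-- the for-loop of A: `cur` = current_base, `count` = count, walking the remaining characters
def aLoop (n : Int) : List Char → Char → Int → Bool
  | [], _, _ => false
  | c :: rest, cur, count =>
    if c = cur then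
      if count + 1 > n then true else aLoop n rest cur (count + 1)
    else aLoop n rest c 1

def find_max_poly_X (kmer : String) (n : Int) : Bool :=
  if (kmer.toList.length : Int) ≤ n then false
  else
    match kmer.toList with
    | [] => false   -- unreachable inside Pre_: Python raises IndexError at kmer[0] here
    | c :: rest => aLoop n rest c 1

-- ===== PORT B =====
-- the inner while loop of _runs: number of leading characters of the suffix equal to the head
def runLen (c : Char) : List Char → Nat
  | [] => 0
  | x :: xs => if x = c then 1 + runLen c xs else 0

-- the outer while loop of _runs: `out` accumulates the run lengths, s is chopped run by run
def runsLoop : List Char → List Nat → List Nat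
  | [], out => out
  | c :: rest, out => runsLoop (rest.drop (runLen c rest)) (out ++ [1 + runLen c rest])
  termination_by s _ => s.length
  decreasing_by simp

def find_max_poly_X_alt (kmer : String) (n : Int) : Bool :=
  if (kmer.toList.length : Int) ≤ n then false
  else (runsLoop kmer.toList []).any (fun r => decide (n < (r : Int)))

-- ===== PRECONDITION & SPEC =====
-- Pre_ excludes only (kmer = "", n < 0), where Python A raises IndexError at kmer[0].
def Pre_find_max_poly_X (kmer : String) (n : Int) : Prop := ¬ (kmer = "" ∧ n < 0)
instance (kmer : String) (n : Int) : Decidable (Pre_find_max_poly_X kmer n) := by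
  unfold Pre_find_max_poly_X; infer_instance

def pvWitness_find_max_poly_X : String × Int := ("GGAATTT", 2)

-- For n ≤ 0 and a nonempty kmer with no two adjacent equal characters, A returns False (its
-- `> n` check only fires after a second consecutive match) while B returns True, which is the
-- intended value: every single base is already a run of length 1 > n.
def D_find_max_poly_X (kmer : String) (n : Int) : Prop :=
  n ≤ 0 ∧ kmer.toList ≠ [] ∧ List.IsChain (fun a b => a ≠ b) kmer.toList
instance (kmer : String) (n : Int) : Decidable (D_find_max_poly_X kmer n) := by
  unfold D_find_max_poly_X; infer_instance

def Spec_find_max_poly_X (kmer : String) (n : Int) (out : Bool) : Prop :=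
  ¬ D_find_max_poly_X kmer n → out = find_max_poly_X_alt kmer n
instance (kmer : String) (n : Int) (out : Bool) : Decidable (Spec_find_max_poly_X kmer n out) := by
  unfold Spec_find_max_poly_X; infer_instance

def pvDiffWitness_find_max_poly_X : String × Int := ("AT", 0)
def pvDiffWitnessOut_find_max_poly_X : Bool × Bool := (false, true)

-- ===== CLAIM (what is proved, stated in full; the proofs are below) =====
def Claim_unchanged_find_max_poly_X : Prop := ∀ (kmer : String) (n : Int), Dom_find_max_poly_X kmer n → Pre_find_max_poly_X kmer n → Spec_find_max_poly_X kmer n (find_max_poly_X kmer n)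
def Claim_changed_find_max_poly_X : Prop := Dom_find_max_poly_X (pvDiffWitness_find_max_poly_X.1) (pvDiffWitness_find_max_poly_X.2) ∧ Pre_find_max_poly_X (pvDiffWitness_find_max_poly_X.1) (pvDiffWitness_find_max_poly_X.2) ∧ D_find_max_poly_X (pvDiffWitness_find_max_poly_X.1) (pvDiffWitness_find_max_poly_X.2) ∧ find_max_poly_X (pvDiffWitness_find_max_poly_X.1) (pvDiffWitness_find_max_poly_X.2) = pvDiffWitnessOut_find_max_poly_X.1 ∧ find_max_poly_X_alt (pvDiffWitness_find_max_poly_X.1) (pvDiffWitness_find_max_poly_X.2) = pvDiffWitnessOut_find_max_poly_X.2 ∧ pvDiffWitnessOut_find_max_poly_X.1 ≠ pvDiffWitnessOut_find_max_poly_X.2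
def Claim_exact_find_max_poly_X : Prop := ∀ (kmer : String) (n : Int), Dom_find_max_poly_X kmer n → Pre_find_max_poly_X kmer n → D_find_max_poly_X kmer n → find_max_poly_X kmer n ≠ find_max_poly_X_alt kmer n

-- ===== LEMMAS AND PROOFS =====

-- the run-length list computed by B, in plain cons form
def runsC : List Char → List Nat
  | [] => []
  | c :: rest => (1 + runLen c rest) :: runsC (rest.drop (runLen c rest))
  termination_by s => s.length
  decreasing_by simp

lemma runsC_nil : runsC [] = [] := by simp [runsC]

lemma runsC_cons (c : Char) (rest : List Char) :
    runsC (c :: rest) = (1 + runLen c rest) :: runsC (rest.drop (runLen c rest)) := by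
  rw [runsC.eq_def]

lemma runsLoop_eq (s : List Char) : ∀ out, runsLoop s out = out ++ runsC s := by
  fun_induction runsC s with
  | case1 => intro out; simp [runsLoop]
  | case2 c rest ih => intro out; rw [runsLoop, ih]; simp

lemma aLoop_eq (n : Int) (rest : List Char) : ∀ (cur : Char) (k : Nat),
    aLoop n rest cur (k : Int) =
      ((decide (0 < runLen cur rest ∧ n < ((k + runLen cur rest : Nat) : Int))) ||
        (runsC (rest.drop (runLen cur rest))).any (fun r => decide (2 ≤ r ∧ n < (r : Int)))) := by
  induction rest with
  | nil => intro cur k; simp [aLoop, runLen, runsC_nil]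
  | cons c rest' ih =>
    intro cur k
    by_cases h : c = cur
    · subst h
      have hr : runLen c (c :: rest') = 1 + runLen c rest' := by simp [runLen]
      have hd : (c :: rest').drop (runLen c (c :: rest')) = rest'.drop (runLen c rest') := by
        rw [hr, Nat.add_comm, List.drop_succ_cons]
      rw [hd, hr]
      by_cases hn : (k : Int) + 1 > n
      · have hL : aLoop n (c :: rest') c (k : Int) = true := by
          simp [aLoop, hn]
        rw [hL]
        have hD : decide (0 < 1 + runLen c rest' ∧ n < ((k + (1 + runLen c rest') : Nat) : Int)) = true := by
          rw [decide_eq_true_eq]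
          refine ⟨by omega, by push_cast; omega⟩
        rw [hD]; simp
      · have h1 : aLoop n (c :: rest') c (k : Int) = aLoop n rest' c ((k : Int) + 1) := by
          simp [aLoop, hn]
        have h2 : ((k : Int) + 1) = ((k + 1 : Nat) : Int) := by push_cast; ring
        rw [h1, h2, ih c (k + 1)]
        congr 1
        rw [decide_eq_decide]
        push_cast
        constructor <;> intro hh <;> constructor <;> omega
    · have hr : runLen cur (c :: rest') = 0 := by simp [runLen, h]
      have h1 : aLoop n (c :: rest') cur (k : Int) = aLoop n rest' c ((1 : Nat) : Int) := by
        simp [aLoop, h]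
      rw [hr, h1, ih c 1]
      simp only [List.drop_zero]
      rw [runsC_cons]
      simp only [List.any_cons]
      have hD : decide (0 < runLen c rest' ∧ n < ((1 + runLen c rest' : Nat) : Int)) =
          decide (2 ≤ 1 + runLen c rest' ∧ n < ((1 + runLen c rest' : Nat) : Int)) := by
        rw [decide_eq_decide]
        constructor <;> intro hh <;> exact ⟨by omega, hh.2⟩
      rw [hD]
      simp

-- A, on a nonempty list past the guard, tests the runs for (length ≥ 2 and length > n)
lemma portA_runs (n : Int) (c : Char) (rest : List Char) :
    aLoop n rest c 1 = (runsC (c :: rest)).any (fun r => decide (2 ≤ r ∧ n < (r : Int))) := by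
  have h1 : ((1 : Nat) : Int) = (1 : Int) := by simp
  rw [← h1, aLoop_eq n rest c 1, runsC_cons]
  simp only [List.any_cons]
  congr 1
  rw [decide_eq_decide]
  constructor <;> intro hh <;> exact ⟨by omega, hh.2⟩

lemma chain_runs_one (rest : List Char) : ∀ c : Char,
    List.IsChain (fun a b => a ≠ b) (c :: rest) → ∀ r ∈ runsC (c :: rest), r = 1 := by
  induction rest with
  | nil => intro c _ r hr; rw [runsC_cons] at hr; simp [runLen, runsC_nil] at hr; omega
  | cons d rest2 ih =>
    intro c hch r hr
    have hcd : c ≠ d := (List.isChain_cons_cons.mp hch).1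
    have hch2 : List.IsChain (fun a b => a ≠ b) (d :: rest2) := (List.isChain_cons_cons.mp hch).2
    have hr0 : runLen c (d :: rest2) = 0 := by simp [runLen, Ne.symm hcd]
    rw [runsC_cons, hr0] at hr
    simp only [List.drop_zero, List.mem_cons] at hr
    rcases hr with h | h
    · omega
    · exact ih d hch2 r h

lemma not_chain_big_run (rest : List Char) : ∀ c : Char,
    ¬ List.IsChain (fun a b => a ≠ b) (c :: rest) → ∃ r ∈ runsC (c :: rest), 2 ≤ r := by
  induction rest with
  | nil => intro c hch; exact absurd (List.isChain_singleton c) hch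
  | cons d rest2 ih =>
    intro c hch
    by_cases hcd : c = d
    · subst hcd
      refine ⟨1 + runLen c (c :: rest2), ?_, ?_⟩
      · rw [runsC_cons]; exact List.mem_cons_self ..
      · simp [runLen]
        omega
    · have hch2 : ¬ List.IsChain (fun a b => a ≠ b) (d :: rest2) := by
        intro h2; exact hch (List.isChain_cons_cons.mpr ⟨hcd, h2⟩)
      obtain ⟨r, hmem, hr⟩ := ih d hch2
      have hr0 : runLen c (d :: rest2) = 0 := by simp [runLen, Ne.symm hcd]
      refine ⟨r, ?_, hr⟩
      rw [runsC_cons, hr0]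
      simp only [List.drop_zero, List.mem_cons]
      exact Or.inr hmem

lemma alt_runs (kmer : String) (n : Int) (h : ¬ (kmer.toList.length : Int) ≤ n) :
    find_max_poly_X_alt kmer n = (runsC kmer.toList).any (fun r => decide (n < (r : Int))) := by
  unfold find_max_poly_X_alt
  rw [if_neg h, runsLoop_eq]
  simp

lemma portA_eq (kmer : String) (n : Int) (c : Char) (rest : List Char)
    (hl : kmer.toList = c :: rest) (h : ¬ (kmer.toList.length : Int) ≤ n) :
    find_max_poly_X kmer n = (runsC (c :: rest)).any (fun r => decide (2 ≤ r ∧ n < (r : Int))) := by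
  unfold find_max_poly_X
  rw [if_neg h, hl, ← portA_runs]

-- ===== VERDICT =====
theorem find_max_poly_X_spec : Claim_unchanged_find_max_poly_X := by
  unfold Claim_unchanged_find_max_poly_X
  intro kmer n _ hpre hnd
  unfold Pre_find_max_poly_X at hpre
  by_cases hg : (kmer.toList.length : Int) ≤ n
  · unfold find_max_poly_X find_max_poly_X_alt
    rw [if_pos hg, if_pos hg]
  · rcases hl : kmer.toList with _ | ⟨c, rest⟩
    · exfalso
      apply hpre
      refine ⟨String.toList_eq_nil_iff.mp hl, ?_⟩
      rw [hl] at hg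
      simp at hg
      omega
    · rw [portA_eq kmer n c rest hl hg, alt_runs kmer n hg, hl]
      by_cases hn : 1 ≤ n
      · congr 1
        funext r
        rw [decide_eq_decide]
        constructor
        · intro hh; exact hh.2
        · intro hh; exact ⟨by omega, hh⟩
      · -- n ≤ 0 and ¬ D_ : there is an adjacent equal pair, so both sides are true
        unfold D_find_max_poly_X at hnd
        push Not at hnd
        have hch : ¬ List.IsChain (fun a b => a ≠ b) kmer.toList := by
          apply hnd (by omega)
          rw [hl]; simp
        rw [hl] at hch
        obtain ⟨r, hmem, hr⟩ := not_chain_big_run rest c hch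
        have hA : (runsC (c :: rest)).any (fun r => decide (2 ≤ r ∧ n < (r : Int))) = true := by
          rw [List.any_eq_true]
          exact ⟨r, hmem, by rw [decide_eq_true_eq]; exact ⟨hr, by omega⟩⟩
        have hB : (runsC (c :: rest)).any (fun r => decide (n < (r : Int))) = true := by
          rw [List.any_eq_true]
          exact ⟨r, hmem, by rw [decide_eq_true_eq]; omega⟩
        rw [hA, hB]

theorem find_max_poly_X_changed : Claim_changed_find_max_poly_X := by
  unfold Claim_changed_find_max_poly_X
  refine ⟨by decide, by decide, by decide, by decide, ?_, by decide⟩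
  have hg : ¬ ((("AT" : String).toList.length : Int) ≤ (0 : Int)) := by decide
  rw [show pvDiffWitness_find_max_poly_X.1 = ("AT" : String) from rfl,
      show pvDiffWitness_find_max_poly_X.2 = (0 : Int) from rfl,
      alt_runs "AT" 0 hg,
      show ("AT" : String).toList = ['A', 'T'] from by decide]
  have e1 : runsC ['A', 'T'] = 1 :: runsC ['T'] := by
    rw [runsC_cons, show runLen 'A' ['T'] = 0 from by decide]
    simp
  have e2 : runsC ['T'] = [1] := by
    rw [runsC_cons, show runLen 'T' [] = 0 from by decide]
    simp [runsC_nil]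
  rw [e1, e2]
  decide

theorem find_max_poly_X_tight : Claim_exact_find_max_poly_X := by
  unfold Claim_exact_find_max_poly_X
  intro kmer n _ _ hd
  obtain ⟨hn, hne, hch⟩ := hd
  rcases hl : kmer.toList with _ | ⟨c, rest⟩
  · exact absurd hl hne
  · have hg : ¬ (kmer.toList.length : Int) ≤ n := by
      rw [hl]
      simp only [List.length_cons]
      push_cast
      omega
    rw [portA_eq kmer n c rest hl hg, alt_runs kmer n hg, hl]
    rw [hl] at hch
    have hA : (runsC (c :: rest)).any (fun r => decide (2 ≤ r ∧ n < (r : Int))) = false := by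
      rw [List.any_eq_false]
      intro r hr
      have h1 := chain_runs_one rest c hch r hr
      subst h1
      simp
    have hB : (runsC (c :: rest)).any (fun r => decide (n < (r : Int))) = true := by
      rw [List.any_eq_true]
      refine ⟨1 + runLen c rest, ?_, ?_⟩
      · rw [runsC_cons]; exact List.mem_cons_self ..
      · rw [decide_eq_true_eq]; push_cast; omega
    rw [hA, hB]
    simp
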